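-- pv_equiv track=rewrite | github.com/SidDar8707/LabPython | _2.py | divided_on
-- ===== SOURCE A (Python) =====
-- def divided_on(num_list):
--     on_2 = [n for n in num_list
--             if n%2 == 0]
--     on_3 = [n for n in num_list
--             if n%3 == 0]
--     on_5 = [n for n in num_list
--             if n%5 == 0]
--     return on_2, on_3, on_5
-- ===== SOURCE B (Python) =====
-- def divided_on(num_list):
--     on_2, on_3, on_5 = [], [], []
--     for n in num_list:
--         if n % 2 == 0:
--             on_2.append(n)
--         if n % 3 == 0:
--             on_3.append(n)
--         if n % 5 == 0:
--             on_5.append(n)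
--     return on_2, on_3, on_5
-- ===== Notes on version B (the rewrite author's own statement) =====
-- stated objective: alternative
-- what changed: Replaces the three separate list-comprehension scans with a single loop over num_list maintaining three accumulator lists, appending n to each list whose divisor divides it.
import Mathlib
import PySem

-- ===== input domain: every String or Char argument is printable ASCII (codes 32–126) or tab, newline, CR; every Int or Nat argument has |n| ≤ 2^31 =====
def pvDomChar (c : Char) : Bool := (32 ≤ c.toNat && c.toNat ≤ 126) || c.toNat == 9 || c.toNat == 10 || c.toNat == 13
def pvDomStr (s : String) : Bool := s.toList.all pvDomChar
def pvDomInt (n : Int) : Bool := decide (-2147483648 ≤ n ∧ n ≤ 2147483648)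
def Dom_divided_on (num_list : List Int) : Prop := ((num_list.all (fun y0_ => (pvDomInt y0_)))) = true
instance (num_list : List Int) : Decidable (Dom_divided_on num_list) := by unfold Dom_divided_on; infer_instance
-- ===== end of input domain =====

-- B replaces A's three separate filter scans with a single loop carrying three accumulator lists (alternative decomposition, same cost).


-- ===== PORT A =====
-- three list comprehensions, each its own filter pass
def divided_on (num_list : List Int) : List Int × List Int × List Int :=
  (num_list.filter (fun n => PySem.Int.mod n 2 == 0),
   num_list.filter (fun n => PySem.Int.mod n 3 == 0),
   num_list.filter (fun n => PySem.Int.mod n 5 == 0))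

-- ===== PORT B =====
-- single loop over num_list with three accumulators, appends to each matching list
def divided_on_alt (num_list : List Int) : List Int × List Int × List Int :=
  num_list.foldl
    (fun acc n =>
      let acc2 := if PySem.Int.mod n 2 == 0 then acc.1 ++ [n] else acc.1
      let acc3 := if PySem.Int.mod n 3 == 0 then acc.2.1 ++ [n] else acc.2.1
      let acc5 := if PySem.Int.mod n 5 == 0 then acc.2.2 ++ [n] else acc.2.2
      (acc2, acc3, acc5))
    ([], [], [])

-- ===== PRECONDITION & SPEC =====
def Spec_divided_on (num_list : List Int) (out : List Int × List Int × List Int) : Prop := out = divided_on_alt num_list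
instance (num_list : List Int) (out : List Int × List Int × List Int) : Decidable (Spec_divided_on num_list out) := by unfold Spec_divided_on; infer_instance

-- ===== CLAIM (what is proved, stated in full; the proofs are below) =====
def Claim_equal_divided_on : Prop := ∀ (num_list : List Int), Dom_divided_on num_list → Spec_divided_on num_list (divided_on num_list)

-- ===== LEMMAS AND PROOFS =====
theorem divided_on_alt_inv (l a b c : List Int) :
    l.foldl
      (fun acc n =>
        let acc2 := if PySem.Int.mod n 2 == 0 then acc.1 ++ [n] else acc.1
        let acc3 := if PySem.Int.mod n 3 == 0 then acc.2.1 ++ [n] else acc.2.1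
        let acc5 := if PySem.Int.mod n 5 == 0 then acc.2.2 ++ [n] else acc.2.2
        (acc2, acc3, acc5))
      (a, b, c)
    = (a ++ l.filter (fun n => PySem.Int.mod n 2 == 0),
       b ++ l.filter (fun n => PySem.Int.mod n 3 == 0),
       c ++ l.filter (fun n => PySem.Int.mod n 5 == 0)) := by
  induction l generalizing a b c with
  | nil => simp
  | cons x xs ih =>
      simp only [List.foldl_cons, List.filter_cons]
      rw [ih]
      by_cases h2 : PySem.Int.mod x 2 == 0 <;>
        by_cases h3 : PySem.Int.mod x 3 == 0 <;>
          by_cases h5 : PySem.Int.mod x 5 == 0 <;>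
            (simp only [beq_iff_eq, PySem.Int.mod_eq_zero_iff_dvd] at h2 h3 h5; simp [h2, h3, h5])

-- ===== VERDICT (by name: the statement is the Claim_ definition above) =====
theorem divided_on_spec : Claim_equal_divided_on := by
  intro l _
  unfold Spec_divided_on divided_on divided_on_alt
  rw [divided_on_alt_inv]
  simp
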